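-- pv_equiv track=rewrite | github.com/liannette/ClusterClue | clusterclue/presto_stat/detect.py | get_bgcs_per_module
-- ===== SOURCE A (Python) =====
-- def get_bgcs_per_module(modules: dict, modules_per_bgc: dict) -> dict:
--     """Detects BGCs for STAT subcluster modules.
--
--     Args:
--         modules (dict): A dictionary where keys are module IDs and values are StatModule objects.
--         modules_per_bgc (dict): A dictionary where each key is a BGC identifier and each value
--             is a list of module identifiers.
--
--     Returns:
--         dict: A dictionary where each key is a module ID and each value is a
--             set of associated BGC IDS.
--     """
--     # for each module, get the BGCs that contain it
--     bgcs_per_module = {}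
--     for mod_id, mod in modules.items():
--         bgcs_per_module[mod_id] = set()
--         for bgc_id, contained_module_ids in modules_per_bgc.items():
--             if mod_id in contained_module_ids:
--                 bgcs_per_module[mod_id].add(bgc_id)
--
--     return bgcs_per_module
-- ===== SOURCE B (Python) =====
-- def get_bgcs_per_module(modules: dict, modules_per_bgc: dict) -> dict:
--     # Inverted index: one pass over the BGC module lists instead of scanning
--     # every BGC list once per module.
--     index = {}
--     for bgc_id, contained_module_ids in modules_per_bgc.items():
--         for mod_id in contained_module_ids:
--             index.setdefault(mod_id, set()).add(bgc_id)
--     return {mod_id: index.get(mod_id, set()) for mod_id in modules}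
-- ===== Notes on version B (the rewrite author's own statement) =====
-- stated objective: faster
-- what changed: Replaced the per-module scan of every BGC module list with a single-pass inverted index (module -> set of BGCs) built once, then read off per module.
import Mathlib
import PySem

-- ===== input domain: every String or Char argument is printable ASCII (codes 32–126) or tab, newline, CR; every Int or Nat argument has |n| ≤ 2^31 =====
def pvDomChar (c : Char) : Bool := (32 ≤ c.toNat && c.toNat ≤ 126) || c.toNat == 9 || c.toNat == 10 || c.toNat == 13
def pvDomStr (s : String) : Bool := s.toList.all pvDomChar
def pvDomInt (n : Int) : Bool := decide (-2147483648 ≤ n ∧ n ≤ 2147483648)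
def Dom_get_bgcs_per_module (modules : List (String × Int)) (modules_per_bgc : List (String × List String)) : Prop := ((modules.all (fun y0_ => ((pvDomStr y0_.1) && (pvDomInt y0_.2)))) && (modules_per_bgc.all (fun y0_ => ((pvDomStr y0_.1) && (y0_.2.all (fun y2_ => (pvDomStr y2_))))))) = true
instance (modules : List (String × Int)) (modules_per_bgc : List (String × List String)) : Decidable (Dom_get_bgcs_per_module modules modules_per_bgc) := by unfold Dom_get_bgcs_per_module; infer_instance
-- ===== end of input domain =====

-- ===== PORT A =====
-- B builds an inverted index in one pass instead of A's per-module rescans (asymptotically faster).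
-- Port of A: for each module, scan every BGC's module list, collecting matching BGC ids into its set.
def get_bgcs_per_module (modules : List (String × Int)) (modules_per_bgc : List (String × List String)) : List (String × List String) :=
  (modules.foldl
    (fun (acc : PySem.Dict String (List String)) p =>
      modules_per_bgc.foldl
        (fun acc q =>
          if q.2.contains p.1 then
            acc.modify p.1 PySem.Set.empty (fun s => PySem.Set.add s q.1)
          else acc)
        (acc.insert p.1 PySem.Set.empty))
    PySem.Dict.empty).items

-- ===== PORT B =====
-- Port of B: build the inverted index (module -> set of BGCs) in one pass, then read it off per module.
def pvBuildIndex (modules_per_bgc : List (String × List String)) : PySem.Dict String (List String) :=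
  modules_per_bgc.foldl
    (fun d q =>
      q.2.foldl (fun d m => d.modify m PySem.Set.empty (fun s => PySem.Set.add s q.1)) d)
    PySem.Dict.empty

def get_bgcs_per_module_alt (modules : List (String × Int)) (modules_per_bgc : List (String × List String)) : List (String × List String) :=
  let index := pvBuildIndex modules_per_bgc
  (modules.foldl
    (fun (acc : PySem.Dict String (List String)) p =>
      acc.insert p.1 (index.getD p.1 PySem.Set.empty))
    PySem.Dict.empty).items

-- ===== PRECONDITION & SPEC =====
def Spec_get_bgcs_per_module (modules : List (String × Int)) (modules_per_bgc : List (String × List String)) (out : List (String × List String)) : Prop := out = get_bgcs_per_module_alt modules modules_per_bgc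
instance (modules : List (String × Int)) (modules_per_bgc : List (String × List String)) (out : List (String × List String)) : Decidable (Spec_get_bgcs_per_module modules modules_per_bgc out) := by unfold Spec_get_bgcs_per_module; infer_instance

-- ===== CLAIM (what is proved, stated in full; the proofs are below) =====
def Claim_equal_get_bgcs_per_module : Prop := ∀ (modules : List (String × Int)) (modules_per_bgc : List (String × List String)), Dom_get_bgcs_per_module modules modules_per_bgc → Spec_get_bgcs_per_module modules modules_per_bgc (get_bgcs_per_module modules modules_per_bgc)

-- ===== LEMMAS AND PROOFS =====

-- B's inner loop (one BGC b with module list ms), observed through a lookup at x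
theorem pv_inner_getD (ms : List String) (d : PySem.Dict String (List String)) (b x : String) :
    (ms.foldl (fun d m => d.modify m PySem.Set.empty (fun s => PySem.Set.add s b)) d).getD x PySem.Set.empty
      = if ms.contains x then PySem.Set.add (d.getD x PySem.Set.empty) b
        else d.getD x PySem.Set.empty := by
  induction ms generalizing d with
  | nil => simp
  | cons m ms ih =>
    simp only [List.foldl_cons, ih, PySem.Dict.getD_modify, List.contains_cons]
    by_cases hxm : x = m
    · subst hxm
      simp [PySem.Set.add_of_mem, PySem.Set.mem_add]
    · have hmx : (m == x) = false := beq_false_of_ne (Ne.symm hxm)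
      simp [hxm]

-- the whole inverted index, observed through a lookup at x
theorem pv_index_getD (mpb : List (String × List String)) (d : PySem.Dict String (List String)) (x : String) :
    (mpb.foldl (fun d q => q.2.foldl (fun d m => d.modify m PySem.Set.empty (fun s => PySem.Set.add s q.1)) d) d).getD x PySem.Set.empty
      = mpb.foldl (fun s q => if q.2.contains x then PySem.Set.add s q.1 else s) (d.getD x PySem.Set.empty) := by
  induction mpb generalizing d with
  | nil => simp
  | cons q mpb ih =>
    simp only [List.foldl_cons, ih, pv_inner_getD]

theorem pv_modify_insert (d : PySem.Dict String (List String)) (k : String) (v : List String)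
    (f : List String → List String) :
    (d.insert k v).modify k PySem.Set.empty f = d.insert k (f v) := by
  simp [PySem.Dict.modify, PySem.Dict.getD_insert_self, PySem.Dict.insert_insert_self]

-- A's inner loop keeps rewriting the single key m of the freshly inserted entry
theorem pv_a_inner (mpb : List (String × List String)) (acc : PySem.Dict String (List String))
    (m : String) (v : List String) :
    mpb.foldl (fun a q => if q.2.contains m then a.modify m PySem.Set.empty (fun s => PySem.Set.add s q.1) else a) (acc.insert m v)
      = acc.insert m (mpb.foldl (fun s q => if q.2.contains m then PySem.Set.add s q.1 else s) v) := by
  induction mpb generalizing v with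
  | nil => simp
  | cons q mpb ih =>
    simp only [List.foldl_cons]
    by_cases hq : q.2.contains m = true
    · rw [if_pos hq, if_pos hq, pv_modify_insert, ih]
    · rw [if_neg hq, if_neg hq, ih]

-- ===== VERDICT (by name: the statement is the Claim_ definition above) =====
theorem get_bgcs_per_module_spec : Claim_equal_get_bgcs_per_module := by
  intro modules mpb _
  unfold Spec_get_bgcs_per_module get_bgcs_per_module get_bgcs_per_module_alt pvBuildIndex
  congr 1
  apply PySem.List.foldl_congr_mem
  intro acc p _
  rw [pv_a_inner, pv_index_getD]
  simp
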